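-- pv_equiv track=rewrite | github.com/pypi-data/pypi-mirror-399 | packages/ray-cli/ray_cli-1.0.3.tar.gz/ray_cli-1.0.3/ray_cli/utils/reports.py | format_iterable
-- ===== SOURCE A (Python) =====
-- from typing import Sequence
--
-- def format_iterable(collection: Sequence, width: int) -> str:
--     truncated_collection = []
--     total_width = 0
--
--     for item in collection:
--         item_width = len(str(item)) + 2
--         if total_width + item_width > width - 4 - len(str(collection[-1])):
--             break
--
--         truncated_collection.append(item)
--         total_width += item_width
--
--     if len(truncated_collection) == len(collection):
--         return ", ".join(map(str, collection))
--
--     return ", ".join(map(str, truncated_collection)) + f",...{collection[-1]}"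
-- ===== SOURCE B (Python) =====
-- from bisect import bisect_right
-- from itertools import accumulate
-- from typing import Sequence
--
--
-- def format_iterable(collection: Sequence, width: int) -> str:
--     if not collection:
--         return ""
--     last = str(collection[-1])
--     limit = width - 4 - len(last)
--     prefix = list(accumulate(len(str(x)) + 2 for x in collection))
--     k = bisect_right(prefix, limit)
--     if k == len(collection):
--         return ", ".join(map(str, collection))
--     return ", ".join(map(str, collection[:k])) + f",...{last}"
-- ===== Notes on version B (the rewrite author's own statement) =====
-- stated objective: alternative
-- what changed: Replaces A's greedy early-break accumulator loop by staged passes: build the cumulative-width prefix-sum list once, then locate the cutoff by binary search (bisect_right) over that sorted list instead of scanning against the budget, then slice-and-join.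
import Mathlib
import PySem

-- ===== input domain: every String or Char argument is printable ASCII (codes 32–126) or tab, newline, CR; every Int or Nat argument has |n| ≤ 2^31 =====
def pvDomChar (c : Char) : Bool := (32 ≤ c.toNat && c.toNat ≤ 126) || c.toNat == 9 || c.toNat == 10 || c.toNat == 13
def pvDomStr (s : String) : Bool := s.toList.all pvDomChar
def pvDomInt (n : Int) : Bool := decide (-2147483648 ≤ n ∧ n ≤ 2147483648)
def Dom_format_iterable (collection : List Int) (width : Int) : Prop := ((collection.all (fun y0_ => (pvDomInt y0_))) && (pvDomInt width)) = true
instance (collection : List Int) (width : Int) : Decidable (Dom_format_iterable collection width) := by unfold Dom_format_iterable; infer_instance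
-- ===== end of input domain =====

-- B builds the prefix-sum list of item widths in one pass and finds the cutoff by binary search (bisect_right) instead of A's greedy early-break scan; same output (alternative decomposition).


-- ===== PORT A =====
-- the 'for item in collection: … break' loop, carrying truncated_collection (returned) and total_width
def pvLoopA (limit : Int) : List Int → Int → List Int
  | [], _ => []
  | x :: xs, tot =>
    let w : Int := (PySem.Str.len (PySem.Int.toStr x) : Int) + 2
    if tot + w > limit then [] else x :: pvLoopA limit xs (tot + w)

def format_iterable (collection : List Int) (width : Int) : String :=
  match collection.getLast? with
  | none => PySem.Str.join ", " []   -- loop body never runs, lengths agree (0 = 0): join over the empty collection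
  | some lastA =>
    let limit : Int := width - 4 - (PySem.Str.len (PySem.Int.toStr lastA) : Int)
    let tc := pvLoopA limit collection 0
    if tc.length = collection.length then PySem.Str.join ", " (collection.map PySem.Int.toStr)
    else PySem.Str.join ", " (tc.map PySem.Int.toStr) ++ ",..." ++ PySem.Int.toStr lastA

-- ===== PORT B =====
-- itertools.accumulate of the item widths len(str(x)) + 2
def pvAcc : List Int → Int → List Int
  | [], _ => []
  | x :: xs, acc =>
    let a := acc + ((PySem.Str.len (PySem.Int.toStr x) : Int) + 2)
    a :: pvAcc xs a

-- bisect.bisect_right(a, x, lo, hi): while lo < hi: mid=(lo+hi)//2; if x < a[mid]: hi=mid else lo=mid+1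
def pvBisectRight (a : List Int) (x : Int) (lo hi : Nat) : Nat :=
  if lo < hi then
    let mid := (lo + hi) / 2
    if x < a.getD mid 0 then pvBisectRight a x lo mid else pvBisectRight a x (mid + 1) hi
  else lo
termination_by hi - lo
decreasing_by all_goals omega

def format_iterable_alt (collection : List Int) (width : Int) : String :=
  if collection.isEmpty then "" else
    let lastB := PySem.Int.toStr (collection.getLast?.getD 0)   -- collection[-1]; the guard makes it total
    let limit : Int := width - 4 - (PySem.Str.len lastB : Int)
    let pre := pvAcc collection 0
    let k := pvBisectRight pre limit 0 pre.length
    if k = collection.length then PySem.Str.join ", " (collection.map PySem.Int.toStr)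
    else PySem.Str.join ", " ((collection.take k).map PySem.Int.toStr) ++ ",..." ++ lastB

-- ===== PRECONDITION & SPEC =====
def Spec_format_iterable (collection : List Int) (width : Int) (out : String) : Prop := out = format_iterable_alt collection width
instance (collection : List Int) (width : Int) (out : String) : Decidable (Spec_format_iterable collection width out) := by unfold Spec_format_iterable; infer_instance

-- ===== CLAIM (what is proved, stated in full; the proofs are below) =====
def Claim_equal_format_iterable : Prop := ∀ (collection : List Int) (width : Int), Dom_format_iterable collection width → Spec_format_iterable collection width (format_iterable collection width)

-- ===== LEMMAS AND PROOFS =====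

theorem pvAcc_length (xs : List Int) (acc : Int) : (pvAcc xs acc).length = xs.length := by
  induction xs generalizing acc with
  | nil => simp [pvAcc]
  | cons x xs ih => simp [pvAcc, ih]

-- every accumulated value is at least the starting accumulator
theorem pvAcc_lb (xs : List Int) (acc : Int) : ∀ b ∈ pvAcc xs acc, acc ≤ b := by
  induction xs generalizing acc with
  | nil => simp [pvAcc]
  | cons x xs ih =>
    intro b hb
    simp only [pvAcc, List.mem_cons] at hb
    have hw : (0 : Int) ≤ (PySem.Str.len (PySem.Int.toStr x) : Int) + 2 := add_nonneg (Int.natCast_nonneg _) (by norm_num)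
    rcases hb with rfl | hb
    · omega
    · have := ih _ _ hb; omega

-- the prefix sums are nondecreasing
theorem pvAcc_pairwise (xs : List Int) (acc : Int) : (pvAcc xs acc).Pairwise (· ≤ ·) := by
  induction xs generalizing acc with
  | nil => simp [pvAcc]
  | cons x xs ih =>
    simp only [pvAcc, List.pairwise_cons]
    exact ⟨fun b hb => pvAcc_lb _ _ b hb, ih _⟩

theorem pvAcc_mono (xs : List Int) (i j : Nat) (hij : i ≤ j) (hj : j < xs.length) :
    (pvAcc xs 0).getD i 0 ≤ (pvAcc xs 0).getD j 0 := by
  rcases Nat.lt_or_ge i j with h | h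
  · have hj' : j < (pvAcc xs 0).length := by rwa [pvAcc_length]
    have hi' : i < (pvAcc xs 0).length := lt_trans h hj'
    rw [List.getD_eq_getElem _ _ hi', List.getD_eq_getElem _ _ hj']
    exact (List.pairwise_iff_getElem.mp (pvAcc_pairwise xs 0)) i j hi' hj' h
  · have : i = j := by omega
    subst this; rfl

-- the length of the ≤-x prefix is pinned by the pointwise facts
theorem takeWhile_len (x : Int) : ∀ (a : List Int) (r : Nat), r ≤ a.length →
    (∀ i, i < r → a.getD i 0 ≤ x) → (∀ i, r ≤ i → i < a.length → x < a.getD i 0) →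
    (a.takeWhile (fun p => decide (p ≤ x))).length = r := by
  intro a
  induction a with
  | nil => intro r hr _ _; simp at hr ⊢; omega
  | cons y ys ih =>
    intro r hr h1 h2
    cases r with
    | zero =>
      have := h2 0 (Nat.zero_le _) (by simp)
      simp only [List.getD_cons_zero] at this
      simp [List.takeWhile, decide_eq_false (by omega : ¬ y ≤ x)]
    | succ s =>
      have hy : y ≤ x := by have := h1 0 (Nat.succ_pos s); simpa using this
      simp only [List.takeWhile, decide_eq_true hy, List.length_cons]
      rw [ih s (by simpa using hr)
        (fun i hi => by have := h1 (i + 1) (by omega); simpa using this)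
        (fun i hi hlen => by have := h2 (i + 1) (by omega) (by simpa using Nat.succ_lt_succ hlen); simpa using this)]

-- binary search invariant: bisect_right lands on the takeWhile cutoff
theorem pvBisect_inv (a : List Int) (x : Int)
    (hmono : ∀ i j, i ≤ j → j < a.length → a.getD i 0 ≤ a.getD j 0) :
    ∀ (n lo hi : Nat), hi - lo ≤ n → lo ≤ hi → hi ≤ a.length →
    (∀ i, i < lo → a.getD i 0 ≤ x) →
    (∀ i, hi ≤ i → i < a.length → x < a.getD i 0) →
    pvBisectRight a x lo hi = (a.takeWhile (fun p => decide (p ≤ x))).length := by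
  intro n
  induction n with
  | zero =>
    intro lo hi hn hle hhi hlo hhiP
    have : lo = hi := by omega
    subst this
    rw [pvBisectRight, if_neg (by omega)]
    exact (takeWhile_len x a lo hhi hlo hhiP).symm
  | succ n ih =>
    intro lo hi hn hle hhi hlo hhiP
    rw [pvBisectRight]
    by_cases hlt : lo < hi
    · rw [if_pos hlt]
      simp only
      by_cases hx : x < a.getD ((lo + hi) / 2) 0
      · rw [if_pos hx]
        exact ih lo ((lo + hi) / 2) (by omega) (by omega) (by omega) hlo
          (fun i hi1 hi2 => lt_of_lt_of_le hx (hmono _ _ hi1 hi2))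
      · rw [if_neg hx]
        exact ih ((lo + hi) / 2 + 1) hi (by omega) (by omega) hhi
          (fun i hi1 => le_trans (hmono i ((lo + hi) / 2) (by omega) (by omega)) (by omega))
          hhiP
    · rw [if_neg hlt]
      have : lo = hi := by omega
      subst this
      exact (takeWhile_len x a lo hhi hlo hhiP).symm

-- A's break-loop returns exactly the prefix whose cumulative widths all fit the limit
theorem pvLoopA_eq_take (limit : Int) (xs : List Int) (tot : Int) :
    pvLoopA limit xs tot = xs.take ((pvAcc xs tot).takeWhile (fun p => decide (p ≤ limit))).length := by
  induction xs generalizing tot with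
  | nil => simp [pvLoopA, pvAcc]
  | cons x xs ih =>
    simp only [pvLoopA, pvAcc, List.takeWhile]
    by_cases h : tot + ((PySem.Str.len (PySem.Int.toStr x) : Int) + 2) ≤ limit
    · rw [if_neg (by omega), decide_eq_true h]
      simp [ih]
    · rw [if_pos (by omega), decide_eq_false h]
      simp

-- ===== VERDICT (by name: the statement is the Claim_ definition above) =====
theorem format_iterable_spec : Claim_equal_format_iterable := by
  intro collection width _
  unfold Spec_format_iterable format_iterable format_iterable_alt
  cases hc : collection.getLast? with
  | none =>
    have : collection = [] := by cases collection <;> simp_all [List.getLast?_eq_none_iff]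
    subst this
    simp [PySem.Str.join]
  | some lastA =>
    have hEmpty : collection.isEmpty = false := by
      cases collection <;> simp_all
    simp only [hEmpty, Bool.false_eq_true, if_false, Option.getD_some]
    rw [pvLoopA_eq_take]
    rw [pvBisect_inv (pvAcc collection 0)
        (width - 4 - (PySem.Str.len (PySem.Int.toStr lastA) : Int))
        (fun i j hij hj => pvAcc_mono collection i j hij (by rwa [pvAcc_length] at hj))
        (pvAcc collection 0).length 0 (pvAcc collection 0).length
        (by omega) (Nat.zero_le _) (le_refl _)
        (fun i hi => absurd hi (Nat.not_lt_zero i))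
        (fun i hi1 hi2 => absurd (lt_of_le_of_lt hi1 hi2) (lt_irrefl _))]
    have hkle : ((pvAcc collection 0).takeWhile
        (fun p => decide (p ≤ width - 4 - (PySem.Str.len (PySem.Int.toStr lastA) : Int)))).length
        ≤ collection.length := by
      have h1 := (List.takeWhile_sublist
        (l := pvAcc collection 0)
        (p := fun p => decide (p ≤ width - 4 - (PySem.Str.len (PySem.Int.toStr lastA) : Int)))).length_le
      simpa [pvAcc_length] using h1
    rw [List.length_take, min_eq_left hkle]
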